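-- pv_equiv track=rewrite | github.com/violentbt/card_distribution | distribution-card/app.py | assign_people_rotational
-- ===== SOURCE A (Python) =====
-- def assign_people_rotational(people, count, start_index):
--     assigned = []
--     n = len(people)
--     for i in range(count):
--         idx = (start_index + i) % n
--         assigned.append(people[idx])
--     new_index = (start_index + count) % n
--     return assigned, new_index
-- ===== SOURCE B (Python) =====
-- def assign_people_rotational(people, count, start_index):
--     n = len(people)
--     start = start_index % n
--     rotated = people[start:] + people[:start]
--     c = max(count, 0)
--     assigned = rotated * (c // n) + rotated[:c % n]
--     return assigned, (start_index + count) % n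
-- ===== Notes on version B (the rewrite author's own statement) =====
-- stated objective: simpler
-- what changed: Replaces the per-element modular-index loop by a single rotation (two slices) followed by whole-list repetition and one final slice, computed from count's quotient and remainder by len(people).
import Mathlib
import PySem

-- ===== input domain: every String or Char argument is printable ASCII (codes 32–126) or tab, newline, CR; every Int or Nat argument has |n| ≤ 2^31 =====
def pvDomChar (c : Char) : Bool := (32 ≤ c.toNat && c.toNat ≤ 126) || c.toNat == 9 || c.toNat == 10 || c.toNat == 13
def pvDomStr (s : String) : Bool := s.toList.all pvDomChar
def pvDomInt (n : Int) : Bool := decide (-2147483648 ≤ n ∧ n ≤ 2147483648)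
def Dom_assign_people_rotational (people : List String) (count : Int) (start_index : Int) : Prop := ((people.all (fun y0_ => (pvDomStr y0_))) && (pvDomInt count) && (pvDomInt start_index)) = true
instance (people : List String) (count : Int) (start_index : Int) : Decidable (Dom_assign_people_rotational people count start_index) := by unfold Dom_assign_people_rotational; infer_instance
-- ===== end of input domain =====

-- B replaces A's per-element modular-index loop by one rotation (two slices) plus list
-- repetition and a final slice computed from count's quotient/remainder by len(people) (simpler).
-- ===== PORT A =====
def assign_people_rotational (people : List String) (count : Int) (start_index : Int) : List String × Int :=
  let n : Int := people.length
  -- for i in range(count): assigned.append(people[(start_index+i) % n])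
  -- people[idx] ported with pyGetD: under Pre_ (people ≠ []) idx = (…) % n is always in range
  let assigned : List String :=
    (PySem.List.pyRange 0 count 1).foldl
      (fun acc i => acc ++ [PySem.List.pyGetD people (PySem.Int.mod (start_index + i) n) ""]) []
  (assigned, PySem.Int.mod (start_index + count) n)

-- ===== PORT B =====
def assign_people_rotational_alt (people : List String) (count : Int) (start_index : Int) : List String × Int :=
  let n : Int := people.length
  let start := PySem.Int.mod start_index n
  let rotated := PySem.List.slice people (some start) none ++ PySem.List.slice people none (some start)
  let c := max count 0
  let assigned :=
    (List.replicate (PySem.Int.floordiv c n).toNat rotated).flatten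
      ++ PySem.List.slice rotated none (some (PySem.Int.mod c n))
  (assigned, PySem.Int.mod (start_index + count) n)

-- ===== PRECONDITION & SPEC =====
-- Pre_: Python A raises ZeroDivisionError ('% 0') when people is empty, for every count; excluded.
def Pre_assign_people_rotational (people : List String) (count : Int) (start_index : Int) : Prop := people ≠ []
instance (people : List String) (count : Int) (start_index : Int) : Decidable (Pre_assign_people_rotational people count start_index) := by unfold Pre_assign_people_rotational; infer_instance
def pvWitness_assign_people_rotational : List String × Int × Int := (["a", "b", "c"], 7, -2)
def Spec_assign_people_rotational (people : List String) (count : Int) (start_index : Int) (out : List String × Int) : Prop := out = assign_people_rotational_alt people count start_index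
instance (people : List String) (count : Int) (start_index : Int) (out : List String × Int) : Decidable (Spec_assign_people_rotational people count start_index out) := by unfold Spec_assign_people_rotational; infer_instance

-- ===== CLAIM (what is proved, stated in full; the proofs are below) =====
def Claim_equal_assign_people_rotational : Prop := ∀ (people : List String) (count : Int) (start_index : Int), Dom_assign_people_rotational people count start_index → Pre_assign_people_rotational people count start_index → Spec_assign_people_rotational people count start_index (assign_people_rotational people count start_index)

-- ===== LEMMAS AND PROOFS =====

-- the canonical element at rotational position k, at the Nat level
def pvCell (people : List String) (s k : Nat) : String :=
  people.getD ((s + k) % people.length) ""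

theorem pvCell_periodic (people : List String) (s k : Nat) :
    pvCell people s (people.length + k) = pvCell people s k := by
  unfold pvCell
  rw [show s + (people.length + k) = s + k + people.length by omega,
      Nat.add_mod_right]

-- Python's (start_index + k) % n, as a Nat index
theorem pvIdx_eq (people : List String) (start_index : Int) (k : Nat) (h : people ≠ []) :
    (PySem.Int.mod (start_index + (k : Int)) (people.length : Int)).toNat
      = ((PySem.Int.mod start_index (people.length : Int)).toNat + k) % people.length := by
  have hm : (0 : Int) < (people.length : Int) := by
    have := List.length_pos_iff.mpr h; exact_mod_cast this
  rw [PySem.Int.mod_eq_emod_of_pos hm, PySem.Int.mod_eq_emod_of_pos hm]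
  have hs : 0 ≤ start_index % (people.length : Int) := Int.emod_nonneg _ (by omega)
  have h2 : (start_index + (k : Int)) % (people.length : Int)
      = ((start_index % (people.length : Int)) + (k : Int)) % (people.length : Int) := by
    conv_lhs => rw [Int.add_emod]
    conv_rhs => rw [Int.add_emod, Int.emod_emod_of_dvd _ dvd_rfl]
  have h3 : (((start_index % (people.length : Int)).toNat + k) % people.length : Nat)
      = ((start_index % (people.length : Int)) + (k : Int)) % (people.length : Int) := by
    push_cast [Int.toNat_of_nonneg hs]
    ring_nf
  rw [h2, ← h3, Int.toNat_natCast]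

-- s = start_index % n is a valid Nat index
theorem pvS_lt (people : List String) (start_index : Int) (h : people ≠ []) :
    (PySem.Int.mod start_index (people.length : Int)).toNat < people.length := by
  have hm : (0 : Int) < (people.length : Int) := by
    have := List.length_pos_iff.mpr h; exact_mod_cast this
  rw [PySem.Int.mod_eq_emod_of_pos hm]
  have := Int.emod_lt_of_pos start_index hm
  have := Int.emod_nonneg start_index (by omega : (people.length : Int) ≠ 0)
  omega

-- A's loop produces the map of pvCell over range
theorem pvA_list (people : List String) (count : Int) (start_index : Int) (h : people ≠ []) :
    (PySem.List.pyRange 0 count 1).foldl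
      (fun acc i => acc ++ [PySem.List.pyGetD people (PySem.Int.mod (start_index + i) (people.length : Int)) ""]) []
    = (List.range count.toNat).map
        (pvCell people (PySem.Int.mod start_index (people.length : Int)).toNat) := by
  have hm : (0 : Int) < (people.length : Int) := by
    have := List.length_pos_iff.mpr h; exact_mod_cast this
  rw [PySem.List.foldl_append_singleton_eq_map, PySem.List.pyRange_one, List.map_map,
      List.nil_append]
  simp only [Int.sub_zero]
  apply List.map_congr_left
  intro k _
  simp only [Function.comp_apply, zero_add]
  have hnn : 0 ≤ PySem.Int.mod (start_index + (k : Int)) (people.length : Int) := by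
    rw [PySem.Int.mod_eq_emod_of_pos hm]; exact Int.emod_nonneg _ (by omega)
  rw [PySem.List.pyGetD_of_nonneg people "" hnn, pvIdx_eq people start_index k h]
  rfl

-- B's rotated list is the map of pvCell over range n
theorem pvRotated (people : List String) (start_index : Int) (h : people ≠ []) :
    PySem.List.slice people (some (PySem.Int.mod start_index (people.length : Int))) none
      ++ PySem.List.slice people none (some (PySem.Int.mod start_index (people.length : Int)))
    = (List.range people.length).map
        (pvCell people (PySem.Int.mod start_index (people.length : Int)).toNat) := by
  have hm : (0 : Int) < (people.length : Int) := by
    have := List.length_pos_iff.mpr h; exact_mod_cast this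
  set sI := PySem.Int.mod start_index (people.length : Int) with hsI
  have hsnn : 0 ≤ sI := by
    rw [hsI, PySem.Int.mod_eq_emod_of_pos hm]; exact Int.emod_nonneg _ (by omega)
  set s := sI.toNat with hs
  have hslt : s < people.length := pvS_lt people start_index h
  rw [PySem.List.slice_from people hsnn, PySem.List.slice_to people hsnn, ← hs]
  apply List.ext_getElem
  · simp only [List.length_append, List.length_drop, List.length_take, List.length_map,
      List.length_range]
    omega
  · intro i h1 h2
    have hi : i < people.length := by
      simpa only [List.length_map, List.length_range] using h2
    rw [List.getElem_map, List.getElem_range]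
    by_cases hcase : i < people.length - s
    · rw [List.getElem_append_left (by simpa only [List.length_drop] using hcase),
          List.getElem_drop]
      unfold pvCell
      rw [Nat.mod_eq_of_lt (by omega), List.getD_eq_getElem _ _ (by omega)]
    · have hge : (List.drop s people).length ≤ i := by
        simp only [List.length_drop]; omega
      rw [List.getElem_append_right hge]
      simp only [List.length_drop]
      rw [List.getElem_take]
      unfold pvCell
      have hmod : (s + i) % people.length = i - (people.length - s) := by
        rw [Nat.mod_eq_sub_mod (by omega), Nat.mod_eq_of_lt (by omega)]
        omega
      rw [hmod, List.getD_eq_getElem _ _ (by omega)]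

-- periodic splitting: map over range (q*m + r) = q copies of the period ++ head of one more
theorem pvSplit (people : List String) (s : Nat) (q r : Nat) (hr : r ≤ people.length) :
    (List.range (q * people.length + r)).map (pvCell people s)
    = (List.replicate q ((List.range people.length).map (pvCell people s))).flatten
        ++ ((List.range people.length).map (pvCell people s)).take r := by
  induction q with
  | zero =>
      simp only [Nat.zero_mul, Nat.zero_add, List.replicate_zero, List.flatten_nil,
        List.nil_append]
      rw [← List.map_take, List.take_range, Nat.min_eq_left hr]
  | succ q ih =>
      have : (q + 1) * people.length + r = people.length + (q * people.length + r) := by ring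
      rw [this, List.range_add, List.map_append, List.map_map]
      have hper : (List.range (q * people.length + r)).map
          (pvCell people s ∘ fun i => people.length + i)
          = (List.range (q * people.length + r)).map (pvCell people s) := by
        apply List.map_congr_left; intro k _
        simp only [Function.comp_apply]; exact pvCell_periodic people s k
      rw [hper, ih, List.replicate_succ, List.flatten_cons, List.append_assoc]

-- c.toNat decomposes as q*m + r via Python floordiv/mod
theorem pvDiv (people : List String) (c : Int) (hc : 0 ≤ c) (h : people ≠ []) :
    c.toNat = (PySem.Int.floordiv c (people.length : Int)).toNat * people.length
        + (PySem.Int.mod c (people.length : Int)).toNat := by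
  have hm : (0 : Int) < (people.length : Int) := by
    have := List.length_pos_iff.mpr h; exact_mod_cast this
  rw [PySem.Int.floordiv_eq_ediv_of_pos hm, PySem.Int.mod_eq_emod_of_pos hm]
  have h1 : c / (people.length : Int) * (people.length : Int) + c % (people.length : Int) = c :=
    Int.ediv_mul_add_emod c _
  have h2 : 0 ≤ c / (people.length : Int) := Int.ediv_nonneg hc (by omega)
  have h3 : 0 ≤ c % (people.length : Int) := Int.emod_nonneg _ (by omega)
  have h4 : c = (((c / (people.length : Int)).toNat * people.length
      + (c % (people.length : Int)).toNat : Nat) : Int) := by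
    push_cast [Int.toNat_of_nonneg h2, Int.toNat_of_nonneg h3]
    linarith [h1]
  conv_lhs => rw [h4, Int.toNat_natCast]

theorem pvR_le (people : List String) (c : Int) (h : people ≠ []) :
    (PySem.Int.mod c (people.length : Int)).toNat ≤ people.length := by
  have hm : (0 : Int) < (people.length : Int) := by
    have := List.length_pos_iff.mpr h; exact_mod_cast this
  rw [PySem.Int.mod_eq_emod_of_pos hm]
  have := Int.emod_lt_of_pos c hm
  omega

-- ===== VERDICT (by name: the statement is the Claim_ definition above) =====
theorem assign_people_rotational_spec : Claim_equal_assign_people_rotational := by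
  intro people count start_index _ hpre
  have h : people ≠ [] := hpre
  unfold Spec_assign_people_rotational assign_people_rotational assign_people_rotational_alt
  show ((PySem.List.pyRange 0 count 1).foldl
      (fun acc i => acc ++ [PySem.List.pyGetD people (PySem.Int.mod (start_index + i) (people.length : Int)) ""]) [],
      PySem.Int.mod (start_index + count) (people.length : Int))
    = ((List.replicate (PySem.Int.floordiv (max count 0) (people.length : Int)).toNat
          (PySem.List.slice people (some (PySem.Int.mod start_index (people.length : Int))) none
            ++ PySem.List.slice people none (some (PySem.Int.mod start_index (people.length : Int))))).flatten
        ++ PySem.List.slice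
            (PySem.List.slice people (some (PySem.Int.mod start_index (people.length : Int))) none
              ++ PySem.List.slice people none (some (PySem.Int.mod start_index (people.length : Int))))
            none (some (PySem.Int.mod (max count 0) (people.length : Int))),
      PySem.Int.mod (start_index + count) (people.length : Int))
  refine Prod.ext ?_ rfl
  show (PySem.List.pyRange 0 count 1).foldl _ [] = _
  rw [pvA_list people count start_index h]
  set s := (PySem.Int.mod start_index (people.length : Int)).toNat with hs
  have hc : count.toNat = (max count 0).toNat := by omega
  have hcnn : 0 ≤ max count 0 := le_max_right _ _
  rw [hc, pvDiv people (max count 0) hcnn h,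
      pvSplit people s _ _ (pvR_le people (max count 0) h),
      pvRotated people start_index h]
  have hrnn : 0 ≤ PySem.Int.mod (max count 0) (people.length : Int) := by
    have hm : (0 : Int) < (people.length : Int) := by
      have := List.length_pos_iff.mpr h; exact_mod_cast this
    rw [PySem.Int.mod_eq_emod_of_pos hm]; exact Int.emod_nonneg _ (by omega)
  rw [PySem.List.slice_to _ hrnn]
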